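-- pv_equiv track=rewrite | github.com/raghav-1998/Problem-of-the-day-GFG | Minimum Integer/Minimum-Integer.py | minimumInteger
-- ===== SOURCE A (Python) =====
-- from typing import List
--
-- def minimumInteger(N : int, A : List[int]) -> int:
--     # code here
--     A.sort()
--     tot=sum(A)
--     for i in A:
--         if(tot<=N*i):
--             mini=i
--             break
--     return mini
-- ===== SOURCE B (Python) =====
-- def minimumInteger(N, A):
--     # No sort needed: the first satisfying element of the sorted list is just
--     # the minimum of all elements x with sum(A) <= N*x.  (Return value only:
--     # unlike A, this does not sort A in place.)
--     tot = sum(A)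
--     return min(x for x in A if tot <= N * x)
-- ===== Notes on version B (the rewrite author's own statement) =====
-- stated objective: faster
-- what changed: Instead of sorting and linearly scanning for the first element x with sum(A) <= N*x, B takes the minimum over a single unsorted pass of the elements satisfying that condition (these agree because the first satisfying element of the sorted list is exactly the minimum satisfying element); Pre_ excludes inputs with no satisfying element, where A raises UnboundLocalError and B raises ValueError.
import Mathlib
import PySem

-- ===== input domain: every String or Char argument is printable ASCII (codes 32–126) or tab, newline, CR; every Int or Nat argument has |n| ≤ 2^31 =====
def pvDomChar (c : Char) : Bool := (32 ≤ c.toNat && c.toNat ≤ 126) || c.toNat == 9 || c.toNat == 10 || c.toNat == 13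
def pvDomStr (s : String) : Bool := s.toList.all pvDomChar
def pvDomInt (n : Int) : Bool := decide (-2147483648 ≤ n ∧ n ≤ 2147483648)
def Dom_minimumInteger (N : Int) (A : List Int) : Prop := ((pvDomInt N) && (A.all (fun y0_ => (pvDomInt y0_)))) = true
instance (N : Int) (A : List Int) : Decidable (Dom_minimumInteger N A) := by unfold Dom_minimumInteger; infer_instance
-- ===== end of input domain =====

-- B replaces A's sort+scan by a single unsorted filtered-min pass (faster; return value only: A sorts its argument in place, B does not).
-- ===== PORT A =====
-- the for-loop with break: first element of the list satisfying tot <= N*i (none = fall through, Python raises UnboundLocalError)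
def pvFirstSat (N tot : Int) : List Int → Option Int
  | [] => none
  | i :: t => if tot ≤ N * i then some i else pvFirstSat N tot t

def minimumInteger (N : Int) (A : List Int) : Int :=
  let As := PySem.List.sorted A (fun x => x) false
  let tot := As.sum
  (pvFirstSat N tot As).getD 0   -- getD 0 never used under Pre_ (A raises there)

-- ===== PORT B =====
def minimumInteger_alt (N : Int) (A : List Int) : Int :=
  let tot := A.sum
  (PySem.List.min? (A.filter (fun x => decide (tot ≤ N * x))) (fun x => x)).getD 0   -- getD 0 never used under Pre_ (B raises there)

-- ===== PRECONDITION & SPEC =====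
-- Pre_ excludes exactly the inputs with no element x with sum(A) <= N*x: there A raises UnboundLocalError (B raises ValueError).
def Pre_minimumInteger (N : Int) (A : List Int) : Prop := A.any (fun x => decide (A.sum ≤ N * x)) = true
instance (N : Int) (A : List Int) : Decidable (Pre_minimumInteger N A) := by unfold Pre_minimumInteger; infer_instance
def pvWitness_minimumInteger : Int × List Int := (2, [1, 3, 2])
def Spec_minimumInteger (N : Int) (A : List Int) (out : Int) : Prop := out = minimumInteger_alt N A
instance (N : Int) (A : List Int) (out : Int) : Decidable (Spec_minimumInteger N A out) := by unfold Spec_minimumInteger; infer_instance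

-- ===== CLAIM (what is proved, stated in full; the proofs are below) =====
def Claim_equal_minimumInteger : Prop := ∀ (N : Int) (A : List Int), Dom_minimumInteger N A → Pre_minimumInteger N A → Spec_minimumInteger N A (minimumInteger N A)

-- ===== LEMMAS AND PROOFS =====

-- min with no key of a cons is the running fold (cited: PySem.List.min?_id_cons); when the head is a lower bound it wins
theorem pv_foldl_min_eq_self (i : Int) (l : List Int) (h : ∀ y ∈ l, i ≤ y) :
    l.foldl min i = i := by
  induction l with
  | nil => rfl
  | cons a t ih =>
    simp only [List.foldl_cons]
    rw [min_eq_left (h a (by simp))]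
    exact ih (fun y hy => h y (List.mem_cons_of_mem a hy))

theorem pv_min?_cons_of_le (i : Int) (l : List Int) (h : ∀ y ∈ l, i ≤ y) :
    PySem.List.min? (i :: l) (fun x => x) = some i := by
  rw [PySem.List.min?_id_cons]
  exact congrArg some (pv_foldl_min_eq_self i l h)

-- on a ≤-sorted list, the first satisfying element is the min of the satisfying elements
theorem pv_firstSat_eq_min?_filter (N tot : Int) (S : List Int)
    (hs : S.Pairwise (· ≤ ·)) :
    pvFirstSat N tot S
      = PySem.List.min? (S.filter (fun x => decide (tot ≤ N * x))) (fun x => x) := by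
  induction S with
  | nil => rfl
  | cons i t ih =>
    rcases List.pairwise_cons.mp hs with ⟨hle, ht⟩
    by_cases hp : tot ≤ N * i
    · simp only [pvFirstSat, hp, if_pos, List.filter_cons]
      refine (pv_min?_cons_of_le i _ ?_).symm
      intro y hy
      exact hle y (List.mem_of_mem_filter hy)
    · simp only [pvFirstSat, hp, if_neg, not_false_iff, List.filter_cons]
      exact ih ht

-- min with no key is permutation-invariant (the minimum of the multiset)
theorem pv_min?_perm (l l' : List Int) (hp : l.Perm l') :
    PySem.List.min? l (fun x => x) = PySem.List.min? l' (fun x => x) := by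
  cases h : PySem.List.min? l (fun x => x) with
  | none =>
    rw [PySem.List.min?_eq_none_iff] at h
    subst h
    rw [(PySem.List.min?_eq_none_iff l' _).mpr (hp.nil_eq).symm]
  | some m =>
    cases h' : PySem.List.min? l' (fun x => x) with
    | none =>
      rw [PySem.List.min?_eq_none_iff] at h'
      subst h'
      exact absurd (hp.symm.nil_eq) (by
        intro hnil
        rw [← hnil, (PySem.List.min?_eq_none_iff _ _).mpr rfl] at h
        cases h)
    | some m' =>
      have hm := PySem.List.min?_mem h
      have hm' := PySem.List.min?_mem h'
      have h1 : m ≤ m' := PySem.List.min?_isMin h m' (hp.mem_iff.mpr hm')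
      have h2 : m' ≤ m := PySem.List.min?_isMin h' m (hp.symm.mem_iff.mpr hm)
      exact congrArg some (le_antisymm h1 h2)

-- ===== VERDICT (by name: the statement is the Claim_ definition above) =====
theorem minimumInteger_spec : Claim_equal_minimumInteger := by
  intro N A _ _
  show minimumInteger N A = minimumInteger_alt N A
  have hgoal : minimumInteger N A
      = (pvFirstSat N (PySem.List.sorted A (fun x => x) false).sum
          (PySem.List.sorted A (fun x => x) false)).getD 0 := rfl
  have hgoal' : minimumInteger_alt N A
      = (PySem.List.min? (A.filter (fun x => decide (A.sum ≤ N * x))) (fun x => x)).getD 0 := rfl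
  rw [hgoal, hgoal']
  have hperm : (PySem.List.sorted A (fun x => x) false).Perm A := PySem.List.sorted_perm A _ _
  have hsum : (PySem.List.sorted A (fun x => x) false).sum = A.sum := hperm.sum_eq
  rw [pv_firstSat_eq_min?_filter _ _ _ (PySem.List.sorted_pairwise A (fun x => x)), hsum,
    pv_min?_perm _ _ (hperm.filter _)]
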